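-- pv_equiv track=rewrite | github.com/goitno/deepworm | deepworm/summary.py | _get_first_paragraph
-- ===== SOURCE A (Python) =====
-- def _get_first_paragraph(report: str) -> str:
--     """Get the first substantial paragraph after the title."""
--     lines = report.split("\n")
--     paragraph_lines: list[str] = []
--     in_paragraph = False
--
--     for line in lines:
--         stripped = line.strip()
--         # Skip headings, empty, bullets, code
--         if stripped.startswith("#") or stripped.startswith("```"):
--             if in_paragraph:
--                 break
--             continue
--         if not stripped:
--             if in_paragraph:
--                 break
--             continue
--         if stripped.startswith(("-", "*", "|", ">")):
--             if in_paragraph: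
--                 break
--             continue
--
--         in_paragraph = True
--         paragraph_lines.append(stripped)
--
--     return " ".join(paragraph_lines)
-- ===== SOURCE B (Python) =====
-- def _get_first_paragraph(report: str) -> str:
--     lines = [l.strip() for l in report.split("\n")]
--     flags = [(not s) or s.startswith(("#", "```", "-", "*", "|", ">")) for s in lines]
--     if False not in flags:
--         return ""
--     start = flags.index(False)
--     tail = flags[start:]
--     end = start + tail.index(True) if True in tail else len(lines)
--     return " ".join(lines[start:end])
-- ===== Notes on version B (the rewrite author's own statement) =====
-- stated objective: alternative
-- what changed: Replaces A's single stateful streaming loop (flag + break/continue) by a staged table-and-index computation: strip all lines, build a boolean skip-flag table, locate the paragraph's start and end boundaries with list.index, and slice-and-join.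
import Mathlib
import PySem

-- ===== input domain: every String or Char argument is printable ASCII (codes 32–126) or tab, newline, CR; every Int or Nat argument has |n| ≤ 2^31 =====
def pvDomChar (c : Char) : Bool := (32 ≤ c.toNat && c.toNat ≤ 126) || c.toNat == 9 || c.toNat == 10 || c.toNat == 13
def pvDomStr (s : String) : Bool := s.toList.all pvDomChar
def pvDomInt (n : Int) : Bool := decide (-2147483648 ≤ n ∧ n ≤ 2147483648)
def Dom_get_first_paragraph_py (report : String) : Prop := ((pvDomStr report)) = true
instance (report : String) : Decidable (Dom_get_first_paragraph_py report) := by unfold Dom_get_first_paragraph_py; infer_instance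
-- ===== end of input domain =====

-- B replaces A's single stateful break/continue loop by a staged table-and-index computation
-- (strip all lines, boolean flag table, boundary search by list.index, slice-and-join); objective: alternative.

-- ===== PORT A =====
-- the for-loop of _get_first_paragraph: state = (paragraph_lines, in_paragraph); 'break' returns acc
def aLoop : List String → List String → Bool → List String
  | [], acc, _ => acc
  | line :: rest, acc, inP =>
    if PySem.Str.startswith (PySem.Str.strip line) "#" || PySem.Str.startswith (PySem.Str.strip line) "```" then
      if inP then acc else aLoop rest acc inP
    else if PySem.Str.strip line == "" then
      if inP then acc else aLoop rest acc inP
    else if PySem.Str.startswith (PySem.Str.strip line) "-" || PySem.Str.startswith (PySem.Str.strip line) "*" ||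
        PySem.Str.startswith (PySem.Str.strip line) "|" || PySem.Str.startswith (PySem.Str.strip line) ">" then
      if inP then acc else aLoop rest acc inP
    else aLoop rest (acc ++ [PySem.Str.strip line]) true

def get_first_paragraph_py (report : String) : String :=
  PySem.Str.join " " (aLoop ((PySem.Str.split? report "\n").getD []) [] false)

-- ===== PORT B =====
-- the flag comprehension's body: (not s) or s.startswith(("#", "```", "-", "*", "|", ">"))
def bFlag (s : String) : Bool :=
  s == "" || PySem.Str.startswith s "#" || PySem.Str.startswith s "```" ||
    PySem.Str.startswith s "-" || PySem.Str.startswith s "*" ||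
    PySem.Str.startswith s "|" || PySem.Str.startswith s ">"

def get_first_paragraph_py_alt (report : String) : String :=
  let lines := ((PySem.Str.split? report "\n").getD []).map PySem.Str.strip
  let flags := lines.map bFlag
  if !(flags.contains false) then ""
  else
    match PySem.List.index? flags false with
    | none => ""  -- unreachable: guarded by 'False not in flags'
    | some start =>
      let tail := PySem.List.slice flags (some (start : Int)) none
      let fin : Nat :=
        match PySem.List.index? tail true with
        | some j => start + j
        | none => lines.length
      PySem.Str.join " " (PySem.List.slice lines (some (start : Int)) (some (fin : Int)))

-- ===== PRECONDITION & SPEC =====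
def Spec_get_first_paragraph_py (report : String) (out : String) : Prop := out = get_first_paragraph_py_alt report
instance (report : String) (out : String) : Decidable (Spec_get_first_paragraph_py report out) := by unfold Spec_get_first_paragraph_py; infer_instance

-- ===== CLAIM (what is proved, stated in full; the proofs are below) =====
def Claim_equal_get_first_paragraph_py : Prop := ∀ (report : String), Dom_get_first_paragraph_py report → Spec_get_first_paragraph_py report (get_first_paragraph_py report)

-- ===== LEMMAS AND PROOFS =====
-- A's skip test, factored through bFlag on the stripped line
def isSkip (line : String) : Bool := bFlag (PySem.Str.strip line)

lemma aLoop_cons_skip (l : String) (rest : List String) (acc : List String)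
    (h : isSkip l = true) (inP : Bool) :
    aLoop (l :: rest) acc inP = if inP then acc else aLoop rest acc inP := by
  simp only [isSkip, bFlag, Bool.or_eq_true] at h
  simp only [aLoop]
  by_cases h1 : (PySem.Str.startswith (PySem.Str.strip l) "#" || PySem.Str.startswith (PySem.Str.strip l) "```") = true
  · rw [if_pos h1]
  · by_cases h2 : (PySem.Str.strip l == "") = true
    · rw [if_neg h1, if_pos h2]
    · by_cases h3 : (PySem.Str.startswith (PySem.Str.strip l) "-" || PySem.Str.startswith (PySem.Str.strip l) "*" ||
          PySem.Str.startswith (PySem.Str.strip l) "|" || PySem.Str.startswith (PySem.Str.strip l) ">") = true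
      · rw [if_neg h1, if_neg h2, if_pos h3]
      · exfalso
        simp only [Bool.or_eq_true, not_or, Bool.not_eq_true] at h1 h3
        rcases h with ((((((h|h)|h)|h)|h)|h)|h) <;> simp_all

lemma aLoop_cons_keep (l : String) (rest : List String) (acc : List String)
    (h : isSkip l = false) (inP : Bool) :
    aLoop (l :: rest) acc inP = aLoop rest (acc ++ [PySem.Str.strip l]) true := by
  simp only [isSkip, bFlag, Bool.or_eq_false_iff] at h
  obtain ⟨⟨⟨⟨⟨⟨he, hh⟩, hb⟩, hd⟩, hs⟩, hp⟩, hg⟩ := h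
  simp only [aLoop, he, hh, hb, hd, hs, hp, hg, Bool.or_self, if_neg Bool.false_ne_true]

lemma aLoop_true (lines : List String) (acc : List String) :
    aLoop lines acc true = acc ++ (lines.takeWhile (fun l => !isSkip l)).map PySem.Str.strip := by
  induction lines generalizing acc with
  | nil => simp [aLoop]
  | cons l rest ih =>
    by_cases h : isSkip l = true
    · simp [aLoop_cons_skip l rest acc h, h]
    · simp only [Bool.not_eq_true] at h
      simp [aLoop_cons_keep l rest acc h, ih, h]

lemma aLoop_false (lines : List String) (acc : List String) :
    aLoop lines acc false =
      acc ++ ((lines.dropWhile isSkip).takeWhile (fun l => !isSkip l)).map PySem.Str.strip := by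
  induction lines generalizing acc with
  | nil => simp [aLoop]
  | cons l rest ih =>
    by_cases h : isSkip l = true
    · simp [aLoop_cons_skip l rest acc h, h, ih]
    · simp only [Bool.not_eq_true] at h
      simp [aLoop_cons_keep l rest acc h, aLoop_true, h]

-- start boundary: the first false flag marks where dropWhile lands
lemma drop_of_index_some {α : Type} (p : α → Bool) (ys : List α) (s : Nat)
    (h : PySem.List.index? (ys.map p) false = some s) : ys.drop s = ys.dropWhile p := by
  induction ys generalizing s with
  | nil => simp [PySem.List.index?] at h
  | cons y ys ih =>
    by_cases hp : p y = true
    · rw [List.map_cons, hp, PySem.List.index?_cons_of_ne _ (by decide)] at h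
      simp only [Option.map_eq_some_iff] at h
      obtain ⟨s', hs', rfl⟩ := h
      simp [hp, ih s' hs']
    · simp only [Bool.not_eq_true] at hp
      rw [List.map_cons, hp, PySem.List.index?_cons_self] at h
      obtain rfl : 0 = s := by simpa using h
      simp [hp]

-- end boundary: taking up to the first true flag is takeWhile of the negation
lemma take_of_index_true_some {α : Type} (p : α → Bool) (zs : List α) (j : Nat)
    (h : PySem.List.index? (zs.map p) true = some j) :
    zs.take j = zs.takeWhile (fun z => !p z) := by
  induction zs generalizing j with
  | nil => simp [PySem.List.index?] at h
  | cons z zs ih =>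
    by_cases hp : p z = true
    · rw [List.map_cons, hp, PySem.List.index?_cons_self] at h
      obtain rfl : 0 = j := by simpa using h
      simp [hp]
    · simp only [Bool.not_eq_true] at hp
      rw [List.map_cons, hp, PySem.List.index?_cons_of_ne _ (by decide)] at h
      simp only [Option.map_eq_some_iff] at h
      obtain ⟨j', hj', rfl⟩ := h
      simp [hp, ih j' hj']

lemma take_of_index_true_none {α : Type} (p : α → Bool) (zs : List α)
    (h : PySem.List.index? (zs.map p) true = none) :
    zs.take zs.length = zs.takeWhile (fun z => !p z) := by
  induction zs with
  | nil => simp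
  | cons z zs ih =>
    by_cases hp : p z = true
    · rw [List.map_cons, hp, PySem.List.index?_cons_self] at h
      exact absurd h (by simp)
    · simp only [Bool.not_eq_true] at hp
      rw [List.map_cons, hp, PySem.List.index?_cons_of_ne _ (by decide)] at h
      simp only [Option.map_eq_none_iff] at h
      simp [hp, ih h]

-- B's staged computation equals the drop/take characterisation, on any line list
lemma alt_core (ys : List String) :
    (let flags := ys.map bFlag
     if !(flags.contains false) then ""
     else
       match PySem.List.index? flags false with
       | none => ""
       | some start =>
         let tail := PySem.List.slice flags (some (start : Int)) none
         let fin : Nat :=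
           match PySem.List.index? tail true with
           | some j => start + j
           | none => ys.length
         PySem.Str.join " " (PySem.List.slice ys (some (start : Int)) (some (fin : Int)))) =
    PySem.Str.join " " ((ys.dropWhile bFlag).takeWhile (fun z => !bFlag z)) := by
  by_cases hc : (ys.map bFlag).contains false = true
  · have hmem : false ∈ ys.map bFlag := by simpa using hc
    have hsome := (PySem.List.index?_isSome_iff (ys.map bFlag) false).mpr hmem
    cases hix : PySem.List.index? (ys.map bFlag) false with
    | none => rw [hix] at hsome; simp at hsome
    | some start =>
      have hdrop : ys.drop start = ys.dropWhile bFlag := drop_of_index_some bFlag ys start hix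
      simp only [hc, Bool.not_true, Bool.false_eq_true, if_false, hix]
      rw [PySem.List.slice_from_natCast, ← List.map_drop, hdrop]
      cases hjx : PySem.List.index? ((ys.dropWhile bFlag).map bFlag) true with
      | some j =>
        rw [PySem.List.slice_natCast]
        have hj : start + j - start = j := by omega
        rw [hj, hdrop, take_of_index_true_some bFlag _ j hjx]
      | none =>
        rw [PySem.List.slice_natCast, hdrop]
        have hlen : (ys.dropWhile bFlag).length ≤ ys.length - start := by
          rw [← hdrop, List.length_drop]
        have h1 : (ys.dropWhile bFlag).take (ys.length - start) = ys.dropWhile bFlag :=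
          List.take_of_length_le hlen
        have h2 := take_of_index_true_none bFlag _ hjx
        rw [List.take_length] at h2
        rw [h1]
        exact congrArg _ h2
  · -- no false flag: every line is a skip line, both sides are ""
    have hall : ∀ x ∈ ys, bFlag x = true := by
      intro x hx
      by_contra hnx
      simp only [Bool.not_eq_true] at hnx
      have : false ∈ ys.map bFlag := List.mem_map.mpr ⟨x, hx, hnx⟩
      exact hc (by simpa using this)
    have hc' : (ys.map bFlag).contains false = false := by
      simpa using hc
    have hd : ys.dropWhile bFlag = [] := List.dropWhile_eq_nil_iff.mpr hall
    rw [hd]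
    simp only [hc', Bool.not_false, if_true]
    simp [PySem.Str.join]

-- ===== VERDICT (by name: the statement is the Claim_ definition above) =====
theorem get_first_paragraph_py_spec : Claim_equal_get_first_paragraph_py := by
  intro report _
  unfold Spec_get_first_paragraph_py get_first_paragraph_py get_first_paragraph_py_alt
  rw [aLoop_false, List.nil_append]
  rw [alt_core]
  congr 1
  rw [List.dropWhile_map, List.takeWhile_map]
  rfl
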